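-- pv_equiv track=rewrite | github.com/ikaushikpal/DS-450-python | Dynamic Programming/Climbing Stairs with variable Jumps.py | stairCaseVarJumps
-- ===== SOURCE A (Python) =====
-- def stairCaseVarJumps(n, jumps):
--     dp = [0] * (n+1)
--     dp[n] = 1
--
--     for i in range(n-1, -1, -1):
--         for j in range(1, jumps[i]+1):
--             index = i + j
--             if 0<=index<=n:
--                 dp[i] += dp[index]
--
--     return dp[0]
-- ===== SOURCE B (Python) =====
-- def stairCaseVarJumps(n, jumps):
--     # suffix[i] holds dp[i] + dp[i+1] + ... + dp[n]; each dp[i] is a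
--     # suffix-sum difference, computed in O(1) per stair.
--     suffix = [0] * (n + 2)
--     suffix[n] = 1
--     for i in range(n - 1, -1, -1):
--         if jumps[i] >= 1:
--             hi = min(i + jumps[i], n)
--             dpi = suffix[i + 1] - suffix[hi + 1]
--         else:
--             dpi = 0
--         suffix[i] = dpi + suffix[i + 1]
--     return suffix[0] - suffix[1]
-- ===== Notes on version B (the rewrite author's own statement) =====
-- stated objective: faster
-- what changed: B replaces A's inner loop over all jump targets (O(n*maxjump) additions) by a running suffix-sum array, computing each dp value as one O(1) difference of suffix sums.
import Mathlib
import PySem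

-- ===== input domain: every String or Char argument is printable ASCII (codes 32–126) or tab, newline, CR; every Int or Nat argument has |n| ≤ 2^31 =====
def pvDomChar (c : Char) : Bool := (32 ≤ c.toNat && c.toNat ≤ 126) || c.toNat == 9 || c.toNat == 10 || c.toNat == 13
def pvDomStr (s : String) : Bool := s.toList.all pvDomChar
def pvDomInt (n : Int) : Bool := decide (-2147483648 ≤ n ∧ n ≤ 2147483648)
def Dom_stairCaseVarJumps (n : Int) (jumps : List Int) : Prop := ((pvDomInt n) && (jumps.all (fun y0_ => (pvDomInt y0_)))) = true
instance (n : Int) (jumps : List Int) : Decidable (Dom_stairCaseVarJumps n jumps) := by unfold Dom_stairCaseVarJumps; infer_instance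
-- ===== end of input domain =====

-- B replaces A's inner loop over jump targets by a running suffix-sum array (one O(1)
-- difference per stair): O(n) instead of O(n*maxjump); proved equal on Pre_ (where A returns).


-- ===== PORT A =====
def stairCaseVarJumps (n : Int) (jumps : List Int) : Int :=
  let dp0 := PySem.List.pySetD (List.replicate (n+1).toNat (0:Int)) n 1
  let dp := (PySem.List.pyRange (n-1) (-1) (-1)).foldl (fun dp i =>
      (PySem.List.pyRange 1 (PySem.List.pyGetD jumps i 0 + 1) 1).foldl (fun dp j =>
        let index := i + j
        if 0 ≤ index ∧ index ≤ n then
          PySem.List.pySetD dp i (PySem.List.pyGetD dp i 0 + PySem.List.pyGetD dp index 0)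
        else dp) dp) dp0
  PySem.List.pyGetD dp 0 0

-- ===== PORT B =====
def stairCaseVarJumps_alt (n : Int) (jumps : List Int) : Int :=
  let s0 := PySem.List.pySetD (List.replicate (n+2).toNat (0:Int)) n 1
  let s := (PySem.List.pyRange (n-1) (-1) (-1)).foldl (fun s i =>
      let dpi := if 1 ≤ PySem.List.pyGetD jumps i 0 then
          let hi := min (i + PySem.List.pyGetD jumps i 0) n
          PySem.List.pyGetD s (i+1) 0 - PySem.List.pyGetD s (hi+1) 0
        else 0
      PySem.List.pySetD s i (dpi + PySem.List.pyGetD s (i+1) 0)) s0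
  PySem.List.pyGetD s 0 0 - PySem.List.pyGetD s 1 0

-- ===== PRECONDITION & SPEC =====
-- Pre_ excludes exactly the inputs on which Python A raises IndexError:
-- n < 0 (dp[-k] on a too-short/empty dp) or len(jumps) < n (jumps[i] out of range).
def Pre_stairCaseVarJumps (n : Int) (jumps : List Int) : Prop :=
  0 ≤ n ∧ n ≤ (jumps.length : Int)
instance (n : Int) (jumps : List Int) : Decidable (Pre_stairCaseVarJumps n jumps) := by
  unfold Pre_stairCaseVarJumps; infer_instance

def pvWitness_stairCaseVarJumps : Int × List Int := (3, [2, 1, 2])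

def Spec_stairCaseVarJumps (n : Int) (jumps : List Int) (out : Int) : Prop := out = stairCaseVarJumps_alt n jumps
instance (n : Int) (jumps : List Int) (out : Int) : Decidable (Spec_stairCaseVarJumps n jumps out) := by unfold Spec_stairCaseVarJumps; infer_instance

-- ===== CLAIM (what is proved, stated in full; the proofs are below) =====
def Claim_equal_stairCaseVarJumps : Prop := ∀ (n : Int) (jumps : List Int), Dom_stairCaseVarJumps n jumps → Pre_stairCaseVarJumps n jumps → Spec_stairCaseVarJumps n jumps (stairCaseVarJumps n jumps)

-- ===== LEMMAS AND PROOFS =====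
def pvDp (N : Nat) (jumps : List Int) : Nat → List Int := fun i =>
  if N ≤ i then [1]
  else ((pvDp N jumps (i+1)).take (jumps.getD i 0).toNat).sum :: pvDp N jumps (i+1)
termination_by i => N - i
decreasing_by omega

lemma pvDp_len (N : Nat) (jumps : List Int) :
    ∀ k i, N ≤ i + k → (pvDp N jumps i).length = (N - i) + 1 := by
  intro k
  induction k with
  | zero => intro i h; rw [pvDp]; simp [show N ≤ i by omega, show N - i = 0 by omega]
  | succ k ih =>
    intro i h
    by_cases hNi : N ≤ i
    · rw [pvDp]; simp [hNi, show N - i = 0 by omega]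
    · rw [pvDp]; simp [hNi]; rw [ih (i+1) (by omega)]; omega

lemma sum_ite_take (L : List Int) (m : Nat) :
    ((List.range m).map (fun k => if k < L.length then L.getD k 0 else 0)).sum
      = (L.take m).sum := by
  induction m with
  | zero => simp
  | succ m ih =>
    rw [List.range_succ, List.map_append, List.sum_append, ih, List.take_add_one]
    by_cases hm : m < L.length
    · simp [List.getD, hm]
    · simp [hm]

lemma set_prefix (p : Nat) (L : List Int) (v : Int) :
    (List.replicate (p+1) (0:Int) ++ L).set p v = List.replicate p 0 ++ v :: L := by
  induction p with
  | zero => simp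
  | succ p ih =>
    rw [List.replicate_succ, List.cons_append, List.set_cons_succ, ih,
      List.replicate_succ, List.cons_append]

lemma getD_prefix (p k : Nat) (L : List Int) :
    (List.replicate p (0:Int) ++ L).getD (p + k) 0 = L.getD k 0 := by
  simp only [List.getD]
  rw [List.getElem?_append_right (by simp)]
  simp

lemma getD_prefix_zero (p : Nat) (L : List Int) (a : Nat) (h : a < p) :
    (List.replicate p (0:Int) ++ L).getD a 0 = 0 := by
  simp [List.getD, List.getElem?_append_left (by simp; omega : a < (List.replicate p (0:Int)).length), h]
def pvSuf (N : Nat) (jumps : List Int) (i : Nat) : List Int :=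
  (List.range (N + 2 - i)).map (fun t => ((pvDp N jumps i).drop t).sum)

lemma pvSuf_getD (N : Nat) (jumps : List Int) (i t : Nat) (h : i ≤ N) :
    (pvSuf N jumps i).getD t 0 = ((pvDp N jumps i).drop t).sum := by
  unfold pvSuf
  by_cases ht : t < N + 2 - i
  · simp [List.getD, List.getElem?_map, List.getElem?_range ht]
  · have hlen : (pvDp N jumps i).length = (N - i) + 1 := pvDp_len N jumps (N - i) i (by omega)
    have : (pvDp N jumps i).drop t = [] := List.drop_eq_nil_of_le (by omega)
    simp [List.getD, this, List.getElem?_eq_none (by simp; omega : ((List.range (N+2-i)).map _).length ≤ t)]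

lemma pvSuf_cons (N : Nat) (jumps : List Int) (a : Nat) (h : a < N) :
    pvSuf N jumps a = (pvDp N jumps a).sum :: pvSuf N jumps (a+1) := by
  unfold pvSuf
  have h2 : N + 2 - a = (N + 2 - (a+1)) + 1 := by omega
  rw [h2, List.range_succ_eq_map, List.map_cons, List.map_map]
  congr 1
  have hdp : pvDp N jumps a = ((pvDp N jumps (a+1)).take (jumps.getD a 0).toNat).sum :: pvDp N jumps (a+1) := by
    rw [pvDp]; simp [show ¬ (N ≤ a) by omega]
  apply List.map_congr_left
  intro t ht
  simp only [Function.comp_apply]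
  rw [hdp, List.drop_succ_cons]
lemma innerA (n : Int) (zs : List Int) (a : Nat) (ha : a < zs.length) (m : Nat) :
    (PySem.List.pyRange 1 (1 + (m:Int)) 1).foldl
      (fun d j =>
        let index := (a:Int) + j
        if 0 ≤ index ∧ index ≤ n then
          PySem.List.pySetD d a (PySem.List.pyGetD d a 0 + PySem.List.pyGetD d index 0)
        else d) zs
    = zs.set a (zs.getD a 0 +
        ((List.range m).map (fun k => if ((a+1+k : Nat) : Int) ≤ n then zs.getD (a+1+k : Nat) 0 else 0)).sum) := by
  induction m with
  | zero =>
    rw [PySem.List.pyRange_one_eq_nil (by omega)]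
    simp [List.getD, List.getElem?_eq_getElem ha]
  | succ m ih =>
    have hcast : (1 + ((m+1 : Nat) : Int)) = (1 + (m:Int)) + 1 := by push_cast; ring
    rw [hcast,
      PySem.List.pyRange_one_succ_right (by omega : (1:Int) ≤ 1 + (m:Int)),
      List.foldl_append, ih, List.range_succ, List.map_append, List.sum_append]
    simp only [List.foldl_cons, List.foldl_nil, List.map_cons, List.map_nil, List.sum_cons,
      List.sum_nil, add_zero]
    have hidx : (a:Int) + (1 + (m:Int)) = ((a+1+m : Nat) : Int) := by push_cast; ring
    have h1 : ∀ w : Int, (zs.set a w).getD a 0 = w := fun w => by simp [List.getD, ha]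
    have h2 : ∀ w : Int, (zs.set a w).getD (a+1+m) 0 = zs.getD (a+1+m) 0 := fun w => by
      simp [List.getD, List.getElem?_set_ne (by omega : a ≠ a+1+m)]
    rw [hidx]
    by_cases hc : ((a+1+m : Nat) : Int) ≤ n
    · rw [if_pos ⟨Int.natCast_nonneg _, hc⟩]
      simp only [PySem.List.pySetD_natCast, PySem.List.pyGetD_natCast, List.set_set, h1, h2]
      congr 1
      rw [if_pos hc]
      ring
    · rw [if_neg (fun hh => hc hh.2), if_neg hc, add_zero]
def pvStepA (n : Int) (jumps : List Int) (dp : List Int) (i : Int) : List Int :=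
  (PySem.List.pyRange 1 (PySem.List.pyGetD jumps i 0 + 1) 1).foldl (fun dp j =>
    let index := i + j
    if 0 ≤ index ∧ index ≤ n then
      PySem.List.pySetD dp i (PySem.List.pyGetD dp i 0 + PySem.List.pyGetD dp index 0)
    else dp) dp

lemma stepA_eq (N : Nat) (jumps : List Int) (a : Nat) (h : a + 1 ≤ N) :
    pvStepA (N:Int) jumps (List.replicate (a+1) 0 ++ pvDp N jumps (a+1)) (a:Int)
      = List.replicate a 0 ++ pvDp N jumps a := by
  have hrest : (pvDp N jumps (a+1)).length = N - a := by
    rw [pvDp_len N jumps (N - (a+1)) (a+1) (by omega)]; omega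
  have hdp : pvDp N jumps a
      = ((pvDp N jumps (a+1)).take (jumps.getD a 0).toNat).sum :: pvDp N jumps (a+1) := by
    rw [pvDp]; simp [show ¬ (N ≤ a) by omega]
  unfold pvStepA
  rw [PySem.List.pyGetD_natCast]
  by_cases hJ : 1 ≤ jumps.getD a 0
  · have hJ1 : jumps.getD a 0 + 1 = 1 + ((jumps.getD a 0).toNat : Int) := by omega
    rw [hJ1, innerA (N:Int) _ a (by simp [hrest]; omega)]
    have hfun : ∀ k : Nat,
        (if ((a+1+k : Nat) : Int) ≤ (N:Int) then
            (List.replicate (a+1) 0 ++ pvDp N jumps (a+1)).getD (a+1+k : Nat) 0 else 0)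
          = (if k < (pvDp N jumps (a+1)).length then (pvDp N jumps (a+1)).getD k 0 else 0) := by
      intro k
      rw [getD_prefix (a+1) k, hrest]
      have hiff : (((a+1+k : Nat) : Int) ≤ (N:Int)) ↔ (k < N - a) := by
        rw [Nat.cast_le]; omega
      by_cases hk : k < N - a
      · rw [if_pos (hiff.mpr hk), if_pos hk]
      · rw [if_neg (fun hh => hk (hiff.mp hh)), if_neg hk]
    have hmap : (List.range (jumps.getD a 0).toNat).map
          (fun k => if ((a+1+k : Nat) : Int) ≤ (N:Int) then
            (List.replicate (a+1) 0 ++ pvDp N jumps (a+1)).getD (a+1+k : Nat) 0 else 0)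
        = (List.range (jumps.getD a 0).toNat).map
          (fun k => if k < (pvDp N jumps (a+1)).length then (pvDp N jumps (a+1)).getD k 0 else 0) :=
      List.map_congr_left (fun k _ => hfun k)
    rw [hmap, sum_ite_take, getD_prefix_zero (a+1) _ a (by omega), set_prefix, zero_add, hdp]
  · rw [PySem.List.pyRange_one_eq_nil (by omega), List.foldl_nil, hdp,
      show (jumps.getD a 0).toNat = 0 by omega]
    simp [List.replicate_succ']
def pvStepB (n : Int) (jumps : List Int) (s : List Int) (i : Int) : List Int :=
  let dpi := if 1 ≤ PySem.List.pyGetD jumps i 0 then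
      let hi := min (i + PySem.List.pyGetD jumps i 0) n
      PySem.List.pyGetD s (i+1) 0 - PySem.List.pyGetD s (hi+1) 0
    else 0
  PySem.List.pySetD s i (dpi + PySem.List.pyGetD s (i+1) 0)

lemma stepB_eq (N : Nat) (jumps : List Int) (a : Nat) (h : a + 1 ≤ N) :
    pvStepB (N:Int) jumps (List.replicate (a+1) 0 ++ pvSuf N jumps (a+1)) (a:Int)
      = List.replicate a 0 ++ pvSuf N jumps a := by
  have hrest : (pvDp N jumps (a+1)).length = N - a := by
    rw [pvDp_len N jumps (N - (a+1)) (a+1) (by omega)]; omega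
  have hdp : pvDp N jumps a
      = ((pvDp N jumps (a+1)).take (jumps.getD a 0).toNat).sum :: pvDp N jumps (a+1) := by
    rw [pvDp]; simp [show ¬ (N ≤ a) by omega]
  have hs1 : PySem.List.pyGetD (List.replicate (a+1) 0 ++ pvSuf N jumps (a+1)) ((a:Int)+1) 0
      = (pvDp N jumps (a+1)).sum := by
    rw [show ((a:Int)+1) = (((a+1)+0 : Nat) : Int) by push_cast; ring,
      PySem.List.pyGetD_natCast, getD_prefix (a+1) 0, pvSuf_getD N jumps (a+1) 0 (by omega),
      List.drop_zero]
  unfold pvStepB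
  rw [PySem.List.pyGetD_natCast]
  by_cases hJ : 1 ≤ jumps.getD a 0
  · rw [if_pos hJ]
    have hmin : min ((a:Int) + jumps.getD a 0) (N:Int)
        = ((min (a + (jumps.getD a 0).toNat) N : Nat) : Int) := by
      rw [Nat.cast_min]; push_cast; rw [Int.toNat_of_nonneg (by omega)]
    have hge : a + 1 ≤ min (a + (jumps.getD a 0).toNat) N := by omega
    have hs2 : PySem.List.pyGetD (List.replicate (a+1) 0 ++ pvSuf N jumps (a+1))
        (((min (a + (jumps.getD a 0).toNat) N : Nat) : Int) + 1) 0
        = ((pvDp N jumps (a+1)).drop (min (a + (jumps.getD a 0).toNat) N - a)).sum := by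
      rw [show (((min (a + (jumps.getD a 0).toNat) N : Nat) : Int) + 1)
          = (((a+1) + (min (a + (jumps.getD a 0).toNat) N - a) : Nat) : Int) by push_cast [hge]; omega,
        PySem.List.pyGetD_natCast, getD_prefix (a+1) _, pvSuf_getD N jumps (a+1) _ (by omega)]
    rw [hmin, hs1]
    dsimp only
    rw [hs2, PySem.List.pySetD_natCast, set_prefix, pvSuf_cons N jumps a (by omega), hdp]
    have htake : (pvDp N jumps (a+1)).take (min (a + (jumps.getD a 0).toNat) N - a)
        = (pvDp N jumps (a+1)).take (jumps.getD a 0).toNat := by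
      rw [List.take_eq_take_min (i := (jumps.getD a 0).toNat), hrest]
      congr 1
      omega
    have hsplit := List.sum_take_add_sum_drop (pvDp N jumps (a+1)) (min (a + (jumps.getD a 0).toNat) N - a)
    rw [htake] at hsplit
    congr 2
    simp only [List.sum_cons]
    omega
  · rw [if_neg hJ, hs1]
    dsimp only
    rw [PySem.List.pySetD_natCast, set_prefix, pvSuf_cons N jumps a (by omega), hdp,
      show (jumps.getD a 0).toNat = 0 by omega]
    simp
lemma foldA (N : Nat) (jumps : List Int) :
    ∀ i, i ≤ N →
      (PySem.List.pyRange ((i:Int)-1) (-1) (-1)).foldl (pvStepA (N:Int) jumps)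
        (List.replicate i 0 ++ pvDp N jumps i) = pvDp N jumps 0 := by
  intro i
  induction i with
  | zero =>
    intro _
    rw [PySem.List.pyRange_neg_one_eq_nil (by omega)]
    simp
  | succ i ih =>
    intro h
    rw [show ((i+1 : Nat) : Int) - 1 = (i:Int) by push_cast; ring,
      PySem.List.pyRange_neg_one_cons (by omega), List.foldl_cons, stepA_eq N jumps i h]
    exact ih (by omega)

lemma foldB (N : Nat) (jumps : List Int) :
    ∀ i, i ≤ N →
      (PySem.List.pyRange ((i:Int)-1) (-1) (-1)).foldl (pvStepB (N:Int) jumps)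
        (List.replicate i 0 ++ pvSuf N jumps i) = pvSuf N jumps 0 := by
  intro i
  induction i with
  | zero =>
    intro _
    rw [PySem.List.pyRange_neg_one_eq_nil (by omega)]
    simp
  | succ i ih =>
    intro h
    rw [show ((i+1 : Nat) : Int) - 1 = (i:Int) by push_cast; ring,
      PySem.List.pyRange_neg_one_cons (by omega), List.foldl_cons, stepB_eq N jumps i h]
    exact ih (by omega)

lemma stairA_eq (n : Int) (jumps : List Int) :
    stairCaseVarJumps n jumps =
      PySem.List.pyGetD ((PySem.List.pyRange (n-1) (-1) (-1)).foldl (pvStepA n jumps)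
        (PySem.List.pySetD (List.replicate (n+1).toNat (0:Int)) n 1)) 0 0 := rfl

lemma stairB_eq (n : Int) (jumps : List Int) :
    stairCaseVarJumps_alt n jumps =
      (let s := (PySem.List.pyRange (n-1) (-1) (-1)).foldl (pvStepB n jumps)
        (PySem.List.pySetD (List.replicate (n+2).toNat (0:Int)) n 1)
      PySem.List.pyGetD s 0 0 - PySem.List.pyGetD s 1 0) := rfl

theorem pvPorts_agree (n : Int) (jumps : List Int) (hn : 0 ≤ n) :
    stairCaseVarJumps n jumps = stairCaseVarJumps_alt n jumps := by
  obtain ⟨N, rfl⟩ := Int.eq_ofNat_of_zero_le hn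
  have hdpN : pvDp N jumps N = [1] := by rw [pvDp]; simp
  have hsufN : pvSuf N jumps N = [1, 0] := by
    unfold pvSuf
    rw [show N + 2 - N = 2 by omega, hdpN]
    simp [List.range_succ]
  have hinitA : PySem.List.pySetD (List.replicate (((N:Int))+1).toNat (0:Int)) (N:Int) 1
      = List.replicate N 0 ++ pvDp N jumps N := by
    rw [show (((N:Int))+1).toNat = N + 1 by omega, PySem.List.pySetD_natCast, hdpN,
      show List.replicate (N+1) (0:Int) = List.replicate (N+1) (0:Int) ++ [] by simp,
      set_prefix]
  have hinitB : PySem.List.pySetD (List.replicate (((N:Int))+2).toNat (0:Int)) (N:Int) 1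
      = List.replicate N 0 ++ pvSuf N jumps N := by
    rw [show (((N:Int))+2).toNat = N + 2 by omega, PySem.List.pySetD_natCast, hsufN,
      show List.replicate (N+2) (0:Int) = List.replicate (N+1) (0:Int) ++ [0] by
        rw [← List.replicate_succ'],
      set_prefix]
  rw [stairA_eq, stairB_eq, hinitA, hinitB]
  dsimp only
  rw [foldA N jumps N le_rfl, foldB N jumps N le_rfl]
  have hlen : (pvDp N jumps 0).length = N + 1 := by
    rw [pvDp_len N jumps N 0 (by omega)]; omega
  obtain ⟨x, xs, hx⟩ := List.exists_cons_of_ne_nil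
    (show pvDp N jumps 0 ≠ [] from by intro hh; rw [hh] at hlen; simp at hlen)
  rw [PySem.List.pyGetD_zero, PySem.List.pyGetD_zero,
    show (1:Int) = ((1:Nat):Int) from rfl, PySem.List.pyGetD_natCast,
    pvSuf_getD N jumps 0 0 (by omega), pvSuf_getD N jumps 0 1 (by omega), hx]
  simp

-- ===== VERDICT (by name: the statement is the Claim_ definition above) =====
theorem stairCaseVarJumps_spec : Claim_equal_stairCaseVarJumps := by
  intro n jumps _ hpre
  unfold Spec_stairCaseVarJumps
  exact pvPorts_agree n jumps hpre.1
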